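-- pv_equiv track=rewrite | github.com/Simmee02/2024_CT | 프로그래머스/0/120815. 피자 나눠 먹기 （2）/피자 나눠 먹기 （2）.py | solution
-- ===== SOURCE A (Python) =====
-- def solution(n):
--     answer = 0
--     #최소공배수 구하는 문제
--     nums = [2,3]
--     num = 6
--     temp = 1
--     for i in range(2):
--         if n%nums[i] == 0:
--             temp = temp * nums[i]
--             n = n//nums[i]
--             num = num//nums[i]
--     temp = num * temp * n
--     answer = temp//6
--     return answer
-- ===== SOURCE B (Python) =====
-- import math
--
-- def solution(n):
--     return n // math.gcd(n, 6)
-- ===== Notes on version B (the rewrite author's own statement) =====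
-- stated objective: idiomatic
-- what changed: Replaces the hand-unrolled trial division against the fixed prime list [2,3] with a single closed-form expression n // math.gcd(n, 6), using Euclid's gcd instead of a loop with num/temp accumulators.
import Mathlib
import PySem

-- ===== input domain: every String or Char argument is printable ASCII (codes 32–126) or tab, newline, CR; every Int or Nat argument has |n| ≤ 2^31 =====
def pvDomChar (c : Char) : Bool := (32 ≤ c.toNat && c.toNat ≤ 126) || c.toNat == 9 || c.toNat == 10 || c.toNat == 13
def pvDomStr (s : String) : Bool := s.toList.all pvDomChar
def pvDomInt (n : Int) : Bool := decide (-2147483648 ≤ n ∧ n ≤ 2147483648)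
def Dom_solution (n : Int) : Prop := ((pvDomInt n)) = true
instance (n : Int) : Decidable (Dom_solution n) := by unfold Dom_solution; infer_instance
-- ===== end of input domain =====

-- B replaces A's hand-unrolled trial division over [2,3] by the closed form n // gcd(n,6) (idiomatic, same cost).


-- ===== PORT A =====
def solution (n : Int) : Int :=
  let nums : List Int := [2, 3]
  let st :=
    (PySem.List.pyRange 0 2 1).foldl
      (fun (st : Int × Int × Int) i =>
        let (n, num, temp) := st
        -- nums[i]: i ∈ range(2) is always in range, so getD's default is never used
        let v := (PySem.List.pyGet? nums i).getD 0
        if PySem.Int.mod n v == 0 then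
          (PySem.Int.floordiv n v, PySem.Int.floordiv num v, temp * v)
        else (n, num, temp))
      (n, 6, 1)
  let temp := st.2.1 * st.2.2 * st.1
  PySem.Int.floordiv temp 6

-- ===== PORT B =====
def solution_alt (n : Int) : Int :=
  PySem.Int.floordiv n (Int.gcd n 6)

-- ===== PRECONDITION & SPEC =====
def Spec_solution (n : Int) (out : Int) : Prop := out = solution_alt n
instance (n : Int) (out : Int) : Decidable (Spec_solution n out) := by unfold Spec_solution; infer_instance

-- ===== CLAIM (what is proved, stated in full; the proofs are below) =====
def Claim_equal_solution : Prop := ∀ (n : Int), Dom_solution n → Spec_solution n (solution n)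

-- ===== LEMMAS AND PROOFS =====

lemma gcd_six (n : Int) :
    (Int.gcd n 6 : Int) =
      if (2:Int) ∣ n then (if (3:Int) ∣ n then 6 else 2)
      else (if (3:Int) ∣ n then 3 else 1) := by
  have h2 : ((2:Int) ∣ n) ↔ (2 ∣ n.natAbs) := by
    rw [← Int.natAbs_dvd_natAbs]; norm_num
  have h3 : ((3:Int) ∣ n) ↔ (3 ∣ n.natAbs) := by
    rw [← Int.natAbs_dvd_natAbs]; norm_num
  have hg : Int.gcd n 6 = Nat.gcd n.natAbs 6 := rfl
  have hrec : Nat.gcd n.natAbs 6 = Nat.gcd (n.natAbs % 6) 6 := by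
    rw [Nat.gcd_comm, Nat.gcd_rec 6 n.natAbs, Nat.gcd_comm]
  set m := n.natAbs with hm
  have hlt : m % 6 < 6 := Nat.mod_lt _ (by norm_num)
  have h2' : (2 ∣ m) ↔ (2 ∣ m % 6) := by omega
  have h3' : (3 ∣ m) ↔ (3 ∣ m % 6) := by omega
  rw [hg, hrec]
  simp only [h2, h3, h2', h3']
  have h0 : 0 ≤ m % 6 := Nat.zero_le _
  interval_cases h : m % 6 <;> norm_num

lemma pyRange_0_2 : PySem.List.pyRange 0 2 1 = [0, 1] := by decide

lemma g0 : (PySem.List.pyGet? ([2, 3] : List Int) 0).getD 0 = 2 := by decide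

lemma g1 : (PySem.List.pyGet? ([2, 3] : List Int) 1).getD 0 = 3 := by decide

theorem solution_spec : Claim_equal_solution := by
  intro n _
  unfold Spec_solution solution_alt solution
  rw [gcd_six]
  simp only [pyRange_0_2, List.foldl, g0, g1, beq_iff_eq]
  have e2 : ∀ a : Int, PySem.Int.floordiv a 2 = a / 2 :=
    fun a => PySem.Int.floordiv_eq_ediv_of_pos (by norm_num)
  have e3 : ∀ a : Int, PySem.Int.floordiv a 3 = a / 3 :=
    fun a => PySem.Int.floordiv_eq_ediv_of_pos (by norm_num)
  have e6 : ∀ a : Int, PySem.Int.floordiv a 6 = a / 6 :=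
    fun a => PySem.Int.floordiv_eq_ediv_of_pos (by norm_num)
  have e1 : ∀ a : Int, PySem.Int.floordiv a 1 = a / 1 :=
    fun a => PySem.Int.floordiv_eq_ediv_of_pos (by norm_num)
  by_cases h2 : (2:Int) ∣ n
  · by_cases h3 : (3:Int) ∣ n
    · obtain ⟨a, ha⟩ := h2
      have hd : (3:Int) ∣ a := by omega
      obtain ⟨k, hk⟩ := hd
      subst hk; subst ha
      have c2 : PySem.Int.mod (2 * (3 * k)) 2 = 0 :=
        (PySem.Int.mod_eq_zero_iff_dvd _ _).2 ⟨3 * k, by ring⟩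
      have d2 : PySem.Int.floordiv (2 * (3 * k)) 2 = 3 * k := by
        rw [e2]; exact Int.mul_ediv_cancel_left _ (by norm_num)
      have c3 : PySem.Int.mod (3 * k) 3 = 0 :=
        (PySem.Int.mod_eq_zero_iff_dvd _ _).2 ⟨k, rfl⟩
      simp only [if_pos c2, d2]
      simp only [if_pos c3]
      have hif : (if (3:Int) ∣ 2 * (3 * k) then (6:Int) else 2) = 6 :=
        if_pos ⟨2 * k, by ring⟩
      rw [if_pos ⟨3 * k, by ring⟩, hif]
      simp only [e2, e3, e6]
      rw [Int.mul_ediv_cancel_left k (show (3:Int) ≠ 0 by norm_num)]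
      rw [show (2 * (3 * k) : Int) = 6 * k by ring]
      rw [show ((6:Int) / 2 / 3 * (1 * 2 * 3) * k) = 6 * k by norm_num]
    · obtain ⟨k, rfl⟩ := h2
      have c2 : PySem.Int.mod (2 * k) 2 = 0 :=
        (PySem.Int.mod_eq_zero_iff_dvd _ _).2 ⟨k, rfl⟩
      have d2 : PySem.Int.floordiv (2 * k) 2 = k := by
        rw [e2]; exact Int.mul_ediv_cancel_left _ (by norm_num)
      have c3 : ¬ PySem.Int.mod k 3 = 0 := by
        rw [PySem.Int.mod_eq_zero_iff_dvd]
        intro h; exact h3 (by omega)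
      simp only [if_pos c2, d2]
      rw [if_neg c3, if_pos (show (2:Int) ∣ 2 * k from ⟨k, rfl⟩), if_neg h3]
      simp only [e2, e6]
      rw [show ((6:Int) / 2 * (1 * 2) * k) = 6 * k by norm_num]
      rw [Int.mul_ediv_cancel_left k (show (6:Int) ≠ 0 by norm_num),
        Int.mul_ediv_cancel_left k (show (2:Int) ≠ 0 by norm_num)]
  · by_cases h3 : (3:Int) ∣ n
    · obtain ⟨k, rfl⟩ := h3
      have c2 : ¬ PySem.Int.mod (3 * k) 2 = 0 := by
        rw [PySem.Int.mod_eq_zero_iff_dvd]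
        intro h; exact h2 h
      have c3 : PySem.Int.mod (3 * k) 3 = 0 :=
        (PySem.Int.mod_eq_zero_iff_dvd _ _).2 ⟨k, rfl⟩
      simp only [if_neg c2, if_pos c3]
      rw [if_neg h2, if_pos ⟨k, rfl⟩]
      simp only [e3, e6]
      rw [Int.mul_ediv_cancel_left _ (show (3:Int) ≠ 0 by norm_num)]
      rw [show ((6:Int) / 3 * (1 * 3) * k) = 6 * k by norm_num]
      exact Int.mul_ediv_cancel_left _ (by norm_num)
    · have c2 : ¬ PySem.Int.mod n 2 = 0 := by
        rw [PySem.Int.mod_eq_zero_iff_dvd]; exact h2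
      have c3 : ¬ PySem.Int.mod n 3 = 0 := by
        rw [PySem.Int.mod_eq_zero_iff_dvd]; exact h3
      simp only [if_neg c2, if_neg c3]
      rw [if_neg h2, if_neg h3]
      simp only [e6, e1]
      rw [show ((6:Int) * 1 * n) = 6 * n by ring, Int.ediv_one,
        Int.mul_ediv_cancel_left _ (show (6:Int) ≠ 0 by norm_num)]
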